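-- pv_equiv track=rewrite | github.com/Vydra95/algorithm-pulp | Tasks/Task2.py | delete_doubles
-- ===== SOURCE A (Python) =====
-- def delete_doubles(nums: list[int]) -> list[int] | str:
--     for k in nums:
--         if not isinstance(k, int):
--             nums = None
--     try:
--         dct = {}
--         for n in nums:
--             if n not in dct:
--                 dct[n] = 0
--             dct[n]+= 1
--         nums = []
--         for i in dct:
--             if dct[i] == 1:
--                 nums.append(i)
--             if dct[i] >= 2:
--                 nums.append(i)
--                 nums.append(i)
--         return nums
--     except TypeError:
--         return "Can't process that"
-- ===== SOURCE B (Python) =====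
-- def delete_doubles(nums: list[int]) -> list[int] | str:
--     for k in nums:
--         if not isinstance(k, int):
--             nums = None
--     try:
--         out = []
--         seen = set()
--         for n in nums:
--             if n not in seen:
--                 seen.add(n)
--                 out.append(n)
--                 if nums.count(n) >= 2:
--                     out.append(n)
--         return out
--     except TypeError:
--         return "Can't process that"
-- ===== Notes on version B (the rewrite author's own statement) =====
-- stated objective: simpler
-- what changed: Replaces A's count-dict construction plus dict-key iteration by a single seen-set pass over the original list that appends each first occurrence once and a second copy when nums.count(n) >= 2.
import Mathlib
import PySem

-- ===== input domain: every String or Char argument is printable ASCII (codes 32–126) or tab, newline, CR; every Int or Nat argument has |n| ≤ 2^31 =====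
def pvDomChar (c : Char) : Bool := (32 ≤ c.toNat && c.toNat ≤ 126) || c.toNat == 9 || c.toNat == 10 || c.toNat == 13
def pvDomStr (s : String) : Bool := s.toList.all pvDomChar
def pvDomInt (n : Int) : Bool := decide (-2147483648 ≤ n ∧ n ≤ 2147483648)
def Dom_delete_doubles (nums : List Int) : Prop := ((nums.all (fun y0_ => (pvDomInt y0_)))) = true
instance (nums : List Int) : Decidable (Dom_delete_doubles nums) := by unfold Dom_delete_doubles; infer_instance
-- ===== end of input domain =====

-- B replaces A's count-dict build + dict-key emission loop by one seen-set pass over the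
-- original list, appending a second copy when nums.count(n) >= 2 (objective: simpler).
-- On List Int inputs neither program's validation/except path fires, so both are total here.

-- ===== PORT A =====
def delete_doubles (nums : List Int) : List Int :=
  let dct : PySem.Dict Int Int := nums.foldl (fun d n =>
      let d := if d.contains n then d else d.insert n 0
      d.modify n 0 (· + 1)) PySem.Dict.empty
  dct.keys.foldl (fun acc i =>
      let c := dct.getD i 0
      let acc := if c == 1 then acc ++ [i] else acc
      if 2 ≤ c then acc ++ [i, i] else acc) ([] : List Int)

-- ===== PORT B =====
def delete_doubles_alt (nums : List Int) : List Int :=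
  (nums.foldl (fun (st : List Int × PySem.Set Int) n =>
      if st.2.contains n then st
      else
        let seen := st.2.add n
        let out := st.1 ++ [n]
        let out := if 2 ≤ PySem.List.count nums n then out ++ [n] else out
        (out, seen)) (([] : List Int), (PySem.Set.empty : PySem.Set Int))).1

-- ===== PRECONDITION & SPEC =====
def Spec_delete_doubles (nums : List Int) (out : List Int) : Prop := out = delete_doubles_alt nums
instance (nums : List Int) (out : List Int) : Decidable (Spec_delete_doubles nums out) := by unfold Spec_delete_doubles; infer_instance

-- ===== CLAIM (what is proved, stated in full; the proofs are below) =====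
def Claim_equal_delete_doubles : Prop := ∀ (nums : List Int), Dom_delete_doubles nums → Spec_delete_doubles nums (delete_doubles nums)

-- ===== LEMMAS AND PROOFS =====

-- what B emits for one distinct element
def pvEmit (nums : List Int) (n : Int) : List Int :=
  if 2 ≤ PySem.List.count nums n then [n, n] else [n]

-- the distinct elements of l not already in s, in first-occurrence order
def pvNew (s : PySem.Set Int) : List Int → List Int
  | [] => []
  | n :: t => if s.contains n then pvNew s t else n :: pvNew (s.add n) t

theorem pvUpdate_eq (l : List Int) : ∀ (s : PySem.Set Int),
    PySem.Set.update s l = s ++ pvNew s l := by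
  induction l with
  | nil => intro s; simp [PySem.Set.update, pvNew]
  | cons n t ih =>
    intro s
    have hu : PySem.Set.update s (n :: t) = PySem.Set.update (s.add n) t := by
      simp [PySem.Set.update]
    by_cases hm : n ∈ s
    · have hc : s.contains n = true := by simpa using hm
      have hs : s.add n = s := by simp [PySem.Set.add, hm]
      have h1 : pvNew s (n :: t) = pvNew s t := by simp [pvNew, hm]
      rw [hu, hs, ih s, h1]
    · have hc : s.contains n = false := by simpa using hm
      have hs : s.add n = s ++ [n] := by simp [PySem.Set.add, hm]
      have h1 : pvNew s (n :: t) = n :: pvNew (s.add n) t := by simp [pvNew, hm]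
      rw [hu, hs, ih (s ++ [n]), h1, hs]
      simp

theorem pvB_fold (nums : List Int) (l : List Int) : ∀ (out : List Int) (s : PySem.Set Int),
    (l.foldl (fun (st : List Int × PySem.Set Int) n =>
      if st.2.contains n then st
      else
        let seen := st.2.add n
        let out := st.1 ++ [n]
        let out := if 2 ≤ PySem.List.count nums n then out ++ [n] else out
        (out, seen)) (out, s)).1 = out ++ (pvNew s l).flatMap (pvEmit nums) := by
  induction l with
  | nil => intro out s; simp [pvNew]
  | cons n t ih =>
    intro out s
    rw [List.foldl_cons]
    by_cases hm : n ∈ s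
    · have hc : s.contains n = true := by simpa using hm
      have h1 : pvNew s (n :: t) = pvNew s t := by simp [pvNew, hm]
      simp only [hc, if_true]
      rw [ih, h1]
    · have hc : s.contains n = false := by simpa using hm
      have h1 : pvNew s (n :: t) = n :: pvNew (s.add n) t := by simp [pvNew, hm]
      simp only [hc, Bool.false_eq_true, if_false]
      rw [ih, h1]
      simp only [List.flatMap_cons, pvEmit, PySem.List.count_eq]
      by_cases h2c : 2 ≤ List.count n nums
      · simp [h2c, List.append_assoc]
      · simp [h2c, List.append_assoc]

theorem pvA_step (d : PySem.Dict Int Int) (n : Int) :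
    ((if d.contains n then d else d.insert n 0).modify n 0 (· + 1)) = d.modify n 0 (· + 1) := by
  by_cases h : d.contains n = true
  · simp [h]
  · have hc : d.contains n = false := Bool.eq_false_iff.mpr h
    have hall : ∀ p ∈ d.items, (p.1 == n) = false := by
      have := hc
      simp only [PySem.Dict.contains, List.any_eq_false] at this
      intro p hp
      simpa using this p hp
    have hfind : d.items.find? (fun p => p.1 == n) = none := by
      rw [List.find?_eq_none]
      intro p hp
      simp [hall p hp]
    have hgd : d.getD n 0 = 0 := by
      simp [PySem.Dict.getD, PySem.Dict.get?, hfind]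
    have hitems : (d.insert n 0).items = d.items ++ [(n, 0)] := by
      simp only [PySem.Dict.insert, hc, Bool.false_eq_true, if_false]
    have hD : d.insert n 0 = PySem.Dict.mk (d.items ++ [(n, 0)]) := PySem.Dict.ext hitems
    have hcont2 : (PySem.Dict.mk (d.items ++ [(n, 0)])).contains n = true := by
      simp [PySem.Dict.contains]
    have hgd2 : (PySem.Dict.mk (d.items ++ [(n, 0)])).getD n 0 = 0 := by
      simp only [PySem.Dict.getD, PySem.Dict.get?, List.find?_append, hfind]
      simp
    have hmap : ∀ z : Int, d.items.map (fun p => if p.1 == n then (n, z) else p) = d.items := by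
      intro z
      rw [List.map_congr_left (g := id) (fun p hp => by simp [hall p hp]), List.map_id]
    apply PySem.Dict.ext
    simp only [hc, Bool.false_eq_true, if_false, PySem.Dict.modify]
    rw [hD, hgd2, hgd]
    simp only [PySem.Dict.insert, hcont2, if_true, hc, Bool.false_eq_true, if_false]
    rw [List.map_append, hmap]
    simp

theorem pvFlatMap_congr {α β : Type} (l : List α) (f g : α → List β)
    (h : ∀ x ∈ l, f x = g x) : l.flatMap f = l.flatMap g := by
  induction l with
  | nil => rfl
  | cons x t ih =>
    simp only [List.flatMap_cons, h x (by simp)]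
    rw [ih (fun y hy => h y (by simp [hy]))]

-- ===== VERDICT (by name: the statement is the Claim_ definition above) =====
theorem delete_doubles_spec : Claim_equal_delete_doubles := by
  intro nums _
  unfold Spec_delete_doubles delete_doubles delete_doubles_alt
  -- B side
  rw [pvB_fold]
  -- A side: the dict built is the counter
  have hdct : nums.foldl (fun d n =>
      let d := if d.contains n then d else d.insert n 0
      d.modify n 0 (· + 1)) PySem.Dict.empty = PySem.Dict.counter nums := by
    rw [PySem.Dict.counter]
    exact PySem.List.foldl_congr_mem nums _ _ _ (fun d x _ => pvA_step d x)
  simp only [hdct]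
  -- rewrite A's emission loop into append-of-block form
  have hbody : ∀ (acc : List Int) (i : Int), i ∈ (PySem.Dict.counter nums).keys →
      (let c := (PySem.Dict.counter nums).getD i 0
       let acc := if c == 1 then acc ++ [i] else acc
       if 2 ≤ c then acc ++ [i, i] else acc) =
      acc ++ ((if (PySem.Dict.counter nums).getD i 0 == 1 then [i] else []) ++
              (if 2 ≤ (PySem.Dict.counter nums).getD i 0 then [i, i] else [])) := by
    intro acc i _
    generalize (PySem.Dict.counter nums).getD i 0 = c
    simp only []
    split_ifs <;> simp
  rw [PySem.List.foldl_congr_mem _ _ _ _ hbody, PySem.List.foldl_append_eq_flatMap]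
  -- keys are the deduped elements; counts agree; pvNew from the empty set is Set.ofList
  have hkeys := PySem.Dict.keys_counter nums
  have hofList : PySem.Set.ofList nums = pvNew PySem.Set.empty nums := by
    have := pvUpdate_eq nums PySem.Set.empty
    simpa [PySem.Set.ofList, PySem.Set.update, PySem.Set.empty] using this
  rw [hkeys, hofList]
  simp only [List.nil_append]
  apply pvFlatMap_congr
  intro x hx
  have hxmem : x ∈ nums := by
    rw [← hofList] at hx
    exact (PySem.Set.mem_ofList nums x).1 hx
  have hcount : 1 ≤ List.count x nums := List.count_pos_iff.2 hxmem
  have hgd : (PySem.Dict.counter nums).getD x 0 = (List.count x nums : Int) :=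
    PySem.Dict.getD_counter nums x
  by_cases h2 : 2 ≤ List.count x nums
  · have hne1 : ¬ List.count x nums = 1 := by omega
    simp [pvEmit, PySem.List.count_eq, hgd, h2, hne1,
      show (2 : Int) ≤ (List.count x nums : Int) by exact_mod_cast h2]
  · have hone : List.count x nums = 1 := by omega
    simp [pvEmit, PySem.List.count_eq, hgd, hone]
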